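-- pv_equiv track=rewrite | github.com/EveryOneIsGross/scratchTHOUGHTS | babelSUMBOOKS.py | read_chunks
-- ===== SOURCE A (Python) =====
-- def read_chunks(text, max_chunk_size=150):
--     """Divide the text into chunks at every '.\n' or based on max_chunk_size."""
--
--     # Split the text at every '.\n'
--     preliminary_chunks = text.split('.\n')
--
--     # Check if any of the preliminary chunks exceed the max_chunk_size
--     # and further divide them if necessary.
--     chunks = []
--     for pre_chunk in preliminary_chunks:
--         while len(pre_chunk) > max_chunk_size:
--             pos = pre_chunk.rfind(' ', 0, max_chunk_size)
--             if pos == -1: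
--                 pos = max_chunk_size
--             chunks.append(pre_chunk[:pos])
--             pre_chunk = pre_chunk[pos:].lstrip()
--         chunks.append(pre_chunk)
--
--     return chunks
-- ===== SOURCE B (Python) =====
-- def read_chunks(text, max_chunk_size=150):
--     """Divide the text into chunks at every '.\n' or based on max_chunk_size."""
--     chunks = []
--     for pre in text.split('.\n'):
--         n = len(pre)
--         start = 0
--         while n - start > max_chunk_size:
--             pos = pre.rfind(' ', start, start + max_chunk_size)
--             if pos == -1:
--                 pos = start + max_chunk_size
--             chunks.append(pre[start:pos])
--             start = pos
--             while start < n and pre[start].isspace():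
--                 start += 1
--         chunks.append(pre[start:])
--     return chunks
-- ===== Notes on version B (the rewrite author's own statement) =====
-- stated objective: alternative
-- what changed: B keeps a moving start index into each '.\n'-separated piece and slices chunks directly from it (rfind and an explicit whitespace-skip at offsets), instead of A's repeated slicing-and-lstripping of ever-new remainder strings.
-- outside the precondition, e.g. on read_chunks('', 0): A returns [''], B returns ['']
import Mathlib
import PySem

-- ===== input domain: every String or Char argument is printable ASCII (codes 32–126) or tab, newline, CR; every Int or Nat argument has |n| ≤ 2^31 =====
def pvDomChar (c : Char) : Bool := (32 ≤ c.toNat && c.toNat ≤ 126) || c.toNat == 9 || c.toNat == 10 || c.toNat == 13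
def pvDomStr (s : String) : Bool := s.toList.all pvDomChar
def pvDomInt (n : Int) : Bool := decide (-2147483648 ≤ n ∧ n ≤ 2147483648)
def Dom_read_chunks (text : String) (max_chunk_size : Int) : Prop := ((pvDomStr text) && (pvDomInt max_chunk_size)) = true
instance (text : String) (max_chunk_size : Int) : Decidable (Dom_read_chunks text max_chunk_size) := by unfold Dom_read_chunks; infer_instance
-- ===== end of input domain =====

-- B keeps a moving start index into each '.\n'-piece instead of A's repeated slicing-and-lstripping
-- of ever-new remainder strings (same chunks, no intermediate remainder copies).

-- ===== PORT A =====
-- A's inner `while len(pre_chunk) > max_chunk_size` loop; the fuel only makes the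
-- recursion total (under Pre_ the loop terminates well within fuel = len + 1).
def chunkLoopA (fuel : Nat) (pre : String) (max_chunk_size : Int) (acc : List String) : List String :=
  match fuel with
  | 0 => acc
  | fuel + 1 =>
    if PySem.Str.len pre > max_chunk_size then
      let pos0 := PySem.Str.rfindFrom pre " " 0 (some max_chunk_size)
      let pos := if pos0 = -1 then max_chunk_size else pos0
      chunkLoopA fuel
        (PySem.Str.lstrip (PySem.Str.slice pre (some pos) none))
        max_chunk_size
        (acc ++ [PySem.Str.slice pre none (some pos)])
    else acc ++ [pre]

def read_chunks (text : String) (max_chunk_size : Int) : List String :=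
  (PySem.Chars.splitOn text.toList ['.', '\n']).foldl
    (fun acc piece => chunkLoopA (piece.length + 1) (String.ofList piece) max_chunk_size acc) []

-- ===== PORT B =====
-- `while start < n and pre[start].isspace(): start += 1`
def skipWsB (fuel : Nat) (cs : List Char) (i : Int) : Int :=
  match fuel with
  | 0 => i
  | fuel + 1 =>
    match PySem.List.pyGet? cs i with
    | some c => if PySem.Chars.isspace c then skipWsB fuel cs (i + 1) else i
    | none => i

-- B's inner loop: a moving start index into the fixed piece cs
def chunkLoopB (fuel : Nat) (cs : List Char) (max_chunk_size : Int) (n : Int) (start : Int)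
    (acc : List String) : List String :=
  match fuel with
  | 0 => acc
  | fuel + 1 =>
    if n - start > max_chunk_size then
      let pos0 := PySem.Chars.rfindFrom cs [' '] start (some (start + max_chunk_size))
      let pos := if pos0 = -1 then start + max_chunk_size else pos0
      chunkLoopB fuel cs max_chunk_size n
        (skipWsB (cs.length + 1) cs pos)
        (acc ++ [String.ofList (PySem.Chars.slice cs (some start) (some pos))])
    else acc ++ [String.ofList (PySem.Chars.slice cs (some start) none)]

def read_chunks_alt (text : String) (max_chunk_size : Int) : List String :=
  (PySem.Chars.splitOn text.toList ['.', '\n']).foldl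
    (fun acc piece => chunkLoopB (piece.length + 1) piece max_chunk_size (piece.length : Int) 0 acc) []

-- ===== PRECONDITION & SPEC =====
-- Pre_ excludes non-positive max_chunk_size: there A's while loop makes no progress and
-- loops forever on almost every text (B likewise); only degenerate texts return there.
def Pre_read_chunks (text : String) (max_chunk_size : Int) : Prop := 1 ≤ max_chunk_size
instance (text : String) (max_chunk_size : Int) : Decidable (Pre_read_chunks text max_chunk_size) := by
  unfold Pre_read_chunks; infer_instance

def pvWitness_read_chunks : String × Int := ("one two three.\nfour", 5)

def Spec_read_chunks (text : String) (max_chunk_size : Int) (out : List String) : Prop :=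
  out = read_chunks_alt text max_chunk_size
instance (text : String) (max_chunk_size : Int) (out : List String) :
    Decidable (Spec_read_chunks text max_chunk_size out) := by unfold Spec_read_chunks; infer_instance

-- ===== CLAIM (what is proved, stated in full; the proofs are below) =====
def Claim_equal_read_chunks : Prop := ∀ (text : String) (max_chunk_size : Int),
  Dom_read_chunks text max_chunk_size → Pre_read_chunks text max_chunk_size →
  Spec_read_chunks text max_chunk_size (read_chunks text max_chunk_size)

-- ===== LEMMAS AND PROOFS =====

-- rfind.go returns -1 or an index ≤ its counter at which sub is a prefix of the drop
lemma rfind_go_cases (s sub : List Char) (k : Nat) :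
    PySem.Chars.rfind.go s sub k = -1 ∨
    ∃ i : Nat, PySem.Chars.rfind.go s sub k = (i : Int) ∧ i ≤ k ∧ sub.isPrefixOf (s.drop i) := by
  induction k with
  | zero =>
    by_cases h : sub.isPrefixOf s
    · exact Or.inr ⟨0, by simp [PySem.Chars.rfind.go, h], le_refl _, by simpa using h⟩
    · exact Or.inl (by simp [PySem.Chars.rfind.go, h])
  | succ k ih =>
    by_cases h : sub.isPrefixOf (s.drop (k + 1))
    · exact Or.inr ⟨k + 1, by simp [PySem.Chars.rfind.go, h], le_refl _, h⟩
    · rcases ih with h1 | ⟨i, h1, h2, h3⟩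
      · exact Or.inl (by simp [PySem.Chars.rfind.go, h, h1])
      · exact Or.inr ⟨i, by simp [PySem.Chars.rfind.go, h, h1], by omega, h3⟩

-- rfind of a nonempty pattern: -1 or a position strictly inside the string
lemma rfind_cases (s sub : List Char) (hsub : sub ≠ []) :
    PySem.Chars.rfind s sub = -1 ∨
    ∃ i : Nat, PySem.Chars.rfind s sub = (i : Int) ∧ i < s.length := by
  rcases rfind_go_cases s sub s.length with h | ⟨i, h1, h2, h3⟩
  · exact Or.inl h
  · refine Or.inr ⟨i, h1, ?_⟩
    have hlen : s.drop i ≠ [] := by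
      intro hnil; rw [hnil] at h3; cases sub with
      | nil => exact hsub rfl
      | cons a l => simp [List.isPrefixOf] at h3
    have hpos : 0 < (s.drop i).length := List.length_pos_of_ne_nil hlen
    have := List.length_drop (l := s) (i := i)
    omega

-- rfindFrom with in-range Nat bounds is rfind on the drop/take window, shifted by st
lemma rfindFrom_window (cs sub : List Char) (st e : Nat) (hse : st ≤ e) (he : e ≤ cs.length) :
    PySem.Chars.rfindFrom cs sub (st : Int) (some (e : Int)) =
      (if PySem.Chars.rfind ((cs.take e).drop st) sub = -1 then -1
       else (st : Int) + PySem.Chars.rfind ((cs.take e).drop st) sub) := by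
  have h1 : ¬ ((cs.length : Int) < (e : Int)) := by exact_mod_cast Nat.not_lt.mpr he
  have h2 : ¬ ((e : Int) < 0) := not_lt.mpr (Int.natCast_nonneg e)
  have h3 : ¬ ((st : Int) < 0) := not_lt.mpr (Int.natCast_nonneg st)
  have h4 : ¬ ((e : Int) < (st : Int)) := by exact_mod_cast Nat.not_lt.mpr hse
  simp only [PySem.Chars.rfindFrom, h1, h2, h3, h4, if_false, Int.toNat_natCast]

-- the index-advancing whitespace skip is dropWhile, expressed through drop
lemma skipWsB_spec (fuel : Nat) (cs : List Char) (i : Nat) (hi : i ≤ cs.length)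
    (hfuel : cs.length - i < fuel) :
    ∃ j : Nat, skipWsB fuel cs (i : Int) = (j : Int) ∧ j ≤ cs.length ∧
      cs.drop j = (cs.drop i).dropWhile PySem.Chars.isspace := by
  induction fuel generalizing i with
  | zero => omega
  | succ fuel ih =>
    simp only [skipWsB]
    by_cases hlt : i < cs.length
    · have hget : PySem.List.pyGet? cs (i : Int) = some cs[i] := by
        rw [PySem.List.pyGet?_natCast]; exact List.getElem?_eq_getElem hlt
      rw [hget]
      dsimp only
      have hcons : cs.drop i = cs[i] :: cs.drop (i + 1) := List.drop_eq_getElem_cons hlt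
      by_cases hsp : PySem.Chars.isspace cs[i]
      · rw [if_pos hsp]
        have hcast : ((i : Int) + 1) = ((i + 1 : Nat) : Int) := by push_cast; ring
        rw [hcast]
        obtain ⟨j, h1, h2, h3⟩ := ih (i + 1) (by omega) (by omega)
        refine ⟨j, h1, h2, ?_⟩
        rw [h3, hcons, List.dropWhile_cons_of_pos hsp]
      · rw [if_neg hsp]
        refine ⟨i, rfl, hi, ?_⟩
        conv_rhs => rw [hcons, List.dropWhile_cons_of_neg hsp]
        exact hcons
    · have hieq : i = cs.length := by omega
      subst hieq
      have hget : PySem.List.pyGet? cs ((cs.length : Nat) : Int) = none := by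
        rw [PySem.List.pyGet?_natCast]; simp
      rw [hget]
      exact ⟨cs.length, rfl, le_refl _, by simp⟩

-- main loop correspondence: A's shrinking remainder string IS cs.drop start
lemma loop_eq (fuel : Nat) (cs : List Char) (max_chunk_size : Int) (hmax : 1 ≤ max_chunk_size)
    (start : Nat) (hs : start ≤ cs.length) (acc : List String) :
    chunkLoopA fuel (String.ofList (cs.drop start)) max_chunk_size acc
      = chunkLoopB fuel cs max_chunk_size (cs.length : Int) (start : Int) acc := by
  induction fuel generalizing start acc with
  | zero => rfl
  | succ fuel ih =>
    simp only [chunkLoopA, chunkLoopB]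
    have hlenA : PySem.Str.len (String.ofList (cs.drop start)) = ((cs.length - start : Nat) : Int) := by
      simp [PySem.Str.len]
    by_cases hc : (cs.length : Int) - (start : Int) > max_chunk_size
    · have hcA : PySem.Str.len (String.ofList (cs.drop start)) > max_chunk_size := by
        rw [hlenA]; omega
      rw [if_pos hcA, if_pos hc]
      -- common continuation: cut at start + posA, skip whitespace, recurse
      have key : ∀ (posA : Int), 0 ≤ posA → posA ≤ max_chunk_size →
          chunkLoopA fuel
            (PySem.Str.lstrip (PySem.Str.slice (String.ofList (cs.drop start)) (some posA) none))
            max_chunk_size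
            (acc ++ [PySem.Str.slice (String.ofList (cs.drop start)) none (some posA)])
          = chunkLoopB fuel cs max_chunk_size (cs.length : Int)
            (skipWsB (cs.length + 1) cs ((start : Int) + posA))
            (acc ++ [String.ofList (PySem.Chars.slice cs (some (start : Int)) (some ((start : Int) + posA)))]) := by
        intro posA hp0 hpm
        have hcast : ((start : Int) + posA) = ((start + posA.toNat : Nat) : Int) := by
          push_cast; omega
        have hchunk : PySem.Str.slice (String.ofList (cs.drop start)) none (some posA)
            = String.ofList (PySem.Chars.slice cs (some (start : Int)) (some ((start : Int) + posA))) := by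
          rw [hcast]
          simp only [PySem.Str.slice, PySem.Chars.slice_eq_listSlice, String.toList_ofList]
          rw [PySem.List.slice_to _ hp0, PySem.List.slice_natCast,
            show start + posA.toNat - start = posA.toNat by omega]
        obtain ⟨j, hj1, hj2, hj3⟩ := skipWsB_spec (cs.length + 1) cs (start + posA.toNat)
          (by omega) (by omega)
        have hpre : PySem.Str.lstrip (PySem.Str.slice (String.ofList (cs.drop start)) (some posA) none)
            = String.ofList (cs.drop j) := by
          simp only [PySem.Str.lstrip, PySem.Str.slice, PySem.Chars.slice_eq_listSlice,
            String.toList_ofList, PySem.Chars.lstrip]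
          rw [PySem.List.slice_from _ hp0, List.drop_drop]
          congr 1
          rw [hj3, Nat.add_comm]
        rw [hchunk, hpre, hcast, hj1]
        exact ih j hj2 _
      -- the two rfind windows are the same list
      have hwin : (((cs.drop start).take max_chunk_size.toNat).drop 0)
          = ((cs.take (start + max_chunk_size.toNat)).drop start) := by
        rw [List.drop_zero, List.drop_take]
        congr 1
        omega
      have hA : PySem.Str.rfindFrom (String.ofList (cs.drop start)) " " 0 (some max_chunk_size)
          = (if PySem.Chars.rfind ((cs.take (start + max_chunk_size.toNat)).drop start) [' '] = -1
             then -1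
             else PySem.Chars.rfind ((cs.take (start + max_chunk_size.toNat)).drop start) [' ']) := by
        have h := rfindFrom_window (cs.drop start) [' '] 0 max_chunk_size.toNat (Nat.zero_le _)
          (by rw [List.length_drop]; omega)
        rw [hwin] at h
        simpa [PySem.Str.rfindFrom, Int.toNat_of_nonneg (by omega : (0:Int) ≤ max_chunk_size)] using h
      have hB : PySem.Chars.rfindFrom cs [' '] (start : Int) (some ((start : Int) + max_chunk_size))
          = (if PySem.Chars.rfind ((cs.take (start + max_chunk_size.toNat)).drop start) [' '] = -1
             then -1
             else (start : Int) + PySem.Chars.rfind ((cs.take (start + max_chunk_size.toNat)).drop start) [' ']) := by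
        have h := rfindFrom_window cs [' '] start (start + max_chunk_size.toNat) (by omega) (by omega)
        have hcast : ((start : Int) + max_chunk_size) = ((start + max_chunk_size.toNat : Nat) : Int) := by
          push_cast; omega
        rw [hcast]
        exact h
      rw [hA, hB]
      rcases rfind_cases ((cs.take (start + max_chunk_size.toNat)).drop start) [' '] (by simp)
        with hneg | ⟨i, hieq, hilt⟩
      · rw [hneg]
        norm_num
        exact key max_chunk_size (by omega) (le_refl _)
      · rw [hieq]
        have hne1 : ¬ ((i : Int) = -1) := by omega
        have hne3 : ¬ ((start : Int) + (i : Int) = -1) := by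
          have := Int.natCast_nonneg start; omega
        simp only [if_neg hne1, if_neg hne3]
        exact key (i : Int) (Int.natCast_nonneg i) (by
          have hwlen : ((cs.take (start + max_chunk_size.toNat)).drop start).length ≤ max_chunk_size.toNat := by
            rw [List.length_drop, List.length_take]
            omega
          omega)
    · have hcA : ¬ PySem.Str.len (String.ofList (cs.drop start)) > max_chunk_size := by
        rw [hlenA]; omega
      rw [if_neg hcA, if_neg hc]
      congr 2
      rw [PySem.Chars.slice_eq_listSlice, PySem.List.slice_from _ (Int.natCast_nonneg start),
        Int.toNat_natCast]

-- both top-level folds agree piece by piece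
lemma fold_eq (pieces : List (List Char)) (max_chunk_size : Int) (hmax : 1 ≤ max_chunk_size)
    (acc : List String) :
    pieces.foldl (fun acc piece => chunkLoopA (piece.length + 1) (String.ofList piece) max_chunk_size acc) acc
      = pieces.foldl (fun acc piece => chunkLoopB (piece.length + 1) piece max_chunk_size (piece.length : Int) 0 acc) acc := by
  induction pieces generalizing acc with
  | nil => rfl
  | cons p ps ih =>
    simp only [List.foldl_cons]
    rw [show (String.ofList p) = String.ofList (p.drop 0) by rw [List.drop_zero],
      show (0 : Int) = ((0 : Nat) : Int) by simp,
      loop_eq (p.length + 1) p max_chunk_size hmax 0 (Nat.zero_le _) acc]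
    exact ih _

-- ===== VERDICT (by name: the statement is the Claim_ definition above) =====
theorem read_chunks_spec : Claim_equal_read_chunks := by
  intro text max_chunk_size hdom hpre
  unfold Spec_read_chunks read_chunks read_chunks_alt
  exact fold_eq _ max_chunk_size hpre []
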